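-- pv_equiv track=rewrite | github.com/leejovan98/coding-challenge-test-py | clumsy.py | solution_louis
-- ===== SOURCE A (Python) =====
-- def solution_louis(properWords, mistypes):
--     hm = dict()
--     for word in properWords:
--         for i in range(len(word)):
--             prefix = word[:i]
--             suffix = word[i + 1 :]
--             wildcard = prefix + "*" + suffix
--             hm[wildcard] = word
--     res = []
--     for mistype in mistypes:
--         for i in range(len(mistype)):
--             prefix = mistype[:i]
--             suffix = mistype[i + 1 :]
--             wildcard = prefix + "*" + suffix
--             if wildcard in hm.keys():
--                 res.append(hm[wildcard])
--     return res
-- ===== SOURCE B (Python) =====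
-- def solution_louis(properWords, mistypes):
--     res = []
--     for mistype in mistypes:
--         for i in range(len(mistype)):
--             wc = mistype[:i] + "*" + mistype[i + 1:]
--             found = None
--             for word in properWords:
--                 for j in range(len(word)):
--                     if word[:j] + "*" + word[j + 1:] == wc:
--                         found = word
--             if found is not None:
--                 res.append(found)
--     return res
-- ===== Notes on version B (the rewrite author's own statement) =====
-- stated objective: alternative
-- what changed: Eliminates A's prebuilt wildcard-keyed dict: for each mistype and position, B linearly scans properWords (keeping the last hit, like dict overwrite) comparing wildcard patterns directly.
import Mathlib
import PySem

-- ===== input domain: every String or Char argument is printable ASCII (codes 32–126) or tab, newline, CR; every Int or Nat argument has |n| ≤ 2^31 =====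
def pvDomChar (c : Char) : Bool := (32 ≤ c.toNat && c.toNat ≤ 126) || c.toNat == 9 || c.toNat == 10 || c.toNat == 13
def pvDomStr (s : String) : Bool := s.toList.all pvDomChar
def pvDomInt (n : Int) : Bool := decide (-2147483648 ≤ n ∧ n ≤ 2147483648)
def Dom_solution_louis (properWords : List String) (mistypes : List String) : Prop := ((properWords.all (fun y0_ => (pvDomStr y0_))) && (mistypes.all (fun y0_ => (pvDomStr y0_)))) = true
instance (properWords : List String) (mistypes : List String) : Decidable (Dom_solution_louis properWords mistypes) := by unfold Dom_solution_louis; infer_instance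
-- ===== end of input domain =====

-- B replaces A's prebuilt wildcard-keyed dict by a direct last-match linear scan of
-- properWords per (mistype, position), comparing wildcard patterns on the spot (alternative, not faster).

-- ===== PORT A =====
def solution_louis (properWords : List String) (mistypes : List String) : List String :=
  let hm : PySem.Dict (List Char) String :=
    properWords.foldl (fun hm word =>
      (PySem.List.pyRange 0 (PySem.Str.len word) 1).foldl (fun hm i =>
        let pre := PySem.List.slice word.toList none (some i)
        let suf := PySem.List.slice word.toList (some (i + 1)) none
        let wildcard := pre ++ '*' :: suf
        hm.insert wildcard word) hm) PySem.Dict.empty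
  mistypes.foldl (fun res mistype =>
    (PySem.List.pyRange 0 (PySem.Str.len mistype) 1).foldl (fun res i =>
      let pre := PySem.List.slice mistype.toList none (some i)
      let suf := PySem.List.slice mistype.toList (some (i + 1)) none
      let wildcard := pre ++ '*' :: suf
      match hm.get? wildcard with
      | some w => res ++ [w]
      | none => res) res) []

-- ===== PORT B =====
def solution_louis_alt (properWords : List String) (mistypes : List String) : List String :=
  mistypes.foldl (fun res mistype =>
    (PySem.List.pyRange 0 (PySem.Str.len mistype) 1).foldl (fun res i =>
      let wc := PySem.List.slice mistype.toList none (some i)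
        ++ '*' :: PySem.List.slice mistype.toList (some (i + 1)) none
      let found : Option String := properWords.foldl (fun found word =>
        (PySem.List.pyRange 0 (PySem.Str.len word) 1).foldl (fun found j =>
          if PySem.List.slice word.toList none (some j)
              ++ '*' :: PySem.List.slice word.toList (some (j + 1)) none == wc
          then some word else found) found) none
      match found with
      | some w => res ++ [w]
      | none => res) res) []

-- ===== PRECONDITION & SPEC =====
def Spec_solution_louis (properWords : List String) (mistypes : List String) (out : List String) : Prop := out = solution_louis_alt properWords mistypes
instance (properWords : List String) (mistypes : List String) (out : List String) : Decidable (Spec_solution_louis properWords mistypes out) := by unfold Spec_solution_louis; infer_instance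

-- ===== CLAIM (what is proved, stated in full; the proofs are below) =====
def Claim_equal_solution_louis : Prop := ∀ (properWords : List String) (mistypes : List String), Dom_solution_louis properWords mistypes → Spec_solution_louis properWords mistypes (solution_louis properWords mistypes)

-- ===== LEMMAS AND PROOFS =====

-- the wildcard key both programs build for string s at (Int) position i
def keyI (s : List Char) (i : Int) : List Char :=
  PySem.List.slice s none (some i) ++ '*' :: PySem.List.slice s (some (i + 1)) none

-- get? after a fold of inserts = last insert with that key (find? on the reverse), else the base dict
theorem get?_foldl_insert {κ ν : Type} [BEq κ] [LawfulBEq κ] [DecidableEq κ]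
    (ps : List (κ × ν)) (d : PySem.Dict κ ν) (k : κ) :
    (ps.foldl (fun d p => d.insert p.1 p.2) d).get? k
      = ((ps.reverse.find? (fun p => p.1 == k)).map Prod.snd).or (d.get? k) := by
  induction ps generalizing d with
  | nil => simp
  | cons a ps ih =>
    simp only [List.foldl_cons, List.reverse_cons, List.find?_append, ih,
      PySem.Dict.get?_insert]
    rcases h : ps.reverse.find? (fun p => p.1 == k) with _ | p <;> rw [h]
    · by_cases hk : k = a.1
      · subst hk
        simp [List.find?, Option.or]
      · simp [List.find?, hk, (by simp [Ne.symm hk] : (a.1 == k) = false), Option.or]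
    · simp [Option.or]

-- reverse of a flatMap
theorem reverse_flatMap {α β : Type} (l : List α) (g : α → List β) :
    (l.flatMap g).reverse = l.reverse.flatMap (fun x => (g x).reverse) := by
  induction l with
  | nil => simp
  | cons a l ih => simp [ih]

-- find? over a flatMap scans block by block
theorem find?_flatMap {α β : Type} (l : List α) (g : α → List β) (p : β → Bool) :
    (l.flatMap g).find? p = l.findSome? (fun x => (g x).find? p) := by
  induction l with
  | nil => simp
  | cons a l ih =>
    simp only [List.flatMap_cons, List.find?_append, ih, List.findSome?_cons]
    rcases (g a).find? p with _ | b <;> simp [Option.or]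

-- a keep-the-last loop is find? on the reverse
theorem foldl_last_match {α : Type} (l : List α) (p : α → Bool) (acc : Option α) :
    l.foldl (fun acc w => if p w then some w else acc) acc = (l.reverse.find? p).or acc := by
  induction l generalizing acc with
  | nil => simp
  | cons a l ih =>
    simp only [List.foldl_cons, ih, List.reverse_cons, List.find?_append]
    rcases h : l.reverse.find? p with _ | b
    · by_cases hp : p a <;> simp [Option.or, List.find?, hp]
    · simp [Option.or]

-- an 'if hit: found = w' loop over positions collapses to an any-test
theorem foldl_if_any {α β : Type} (l : List α) (p : α → Bool) (w : β) (acc : Option β) :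
    l.foldl (fun acc j => if p j then some w else acc) acc
      = if l.any p then some w else acc := by
  induction l generalizing acc with
  | nil => simp
  | cons a l ih =>
    simp only [List.foldl_cons, ih, List.any_cons]
    by_cases hp : p a <;> simp [hp]

-- mapping a findSome? whose blocks are characterised by a Bool condition
theorem map_findSome?_of_ite {α β : Type} (l : List α) (F : α → Option β) (f : β → α)
    (cond : α → Bool) (h : ∀ w ∈ l, (F w).map f = if cond w then some w else none) :
    (l.findSome? F).map f = l.find? cond := by
  induction l with
  | nil => simp
  | cons a l ih =>
    have ha := h a (by simp)
    rcases hF : F a with _ | b <;> rw [hF] at ha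
    · have hc : cond a = false := by
        cases hcc : cond a
        · rfl
        · rw [hcc] at ha; simp at ha
      rw [List.findSome?_cons, hF, List.find?, hc]
      exact ih (fun w hw => h w (by simp [hw]))
    · have hc : cond a = true := by
        cases hcc : cond a
        · rw [hcc] at ha; simp at ha
        · rfl
      rw [List.findSome?_cons, hF, List.find?, hc]
      simpa [hc] using ha

-- find? on a list of pairs whose second components are all w
theorem map_snd_find?_const {κ ν : Type} (ps : List (κ × ν)) (w : ν) (p : κ × ν → Bool)
    (h : ∀ q ∈ ps, q.2 = w) :
    (ps.find? p).map Prod.snd = if ps.any p then some w else none := by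
  induction ps with
  | nil => simp
  | cons a ps ih =>
    simp only [List.find?, List.any_cons]
    by_cases hp : p a
    · simp [hp, h a (by simp)]
    · simp only [hp, Bool.false_or]
      exact ih (fun q hq => h q (by simp [hq]))

-- the pairs A inserts for one word
def pairsOf (w : String) : List (List Char × String) :=
  (PySem.List.pyRange 0 (PySem.Str.len w) 1).map (fun i => (keyI w.toList i, w))

-- A's dict build, flattened to a single insert fold
theorem build_eq_flat (pw : List String) (d : PySem.Dict (List Char) String) :
    pw.foldl (fun hm word =>
        (PySem.List.pyRange 0 (PySem.Str.len word) 1).foldl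
          (fun hm i => hm.insert (keyI word.toList i) word) hm) d
      = (pw.flatMap pairsOf).foldl (fun d p => d.insert p.1 p.2) d := by
  induction pw generalizing d with
  | nil => simp
  | cons a pw ih =>
    simp only [List.foldl_cons, List.flatMap_cons, List.foldl_append, ih, pairsOf,
      List.foldl_map]

-- MAIN per-(mistype, position) lemma: A's dict lookup = B's last-match wildcard scan
theorem lookup_eq_scan (pw : List String) (m : String) (i : Int) :
    ((pw.foldl (fun hm word =>
        (PySem.List.pyRange 0 (PySem.Str.len word) 1).foldl
          (fun hm i => hm.insert (keyI word.toList i) word) hm)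
        (PySem.Dict.empty : PySem.Dict (List Char) String)).get? (keyI m.toList i))
      = pw.foldl (fun found word =>
          (PySem.List.pyRange 0 (PySem.Str.len word) 1).foldl
            (fun found j => if keyI word.toList j == keyI m.toList i then some word else found)
            found) none := by
  have hB : pw.foldl (fun found word =>
        (PySem.List.pyRange 0 (PySem.Str.len word) 1).foldl
          (fun found j => if keyI word.toList j == keyI m.toList i then some word else found)
          found) none
      = pw.foldl (fun found word =>
          if (PySem.List.pyRange 0 (PySem.Str.len word) 1).any
              (fun j => keyI word.toList j == keyI m.toList i) then some word else found) none := by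
    apply PySem.List.foldl_congr_mem
    intro acc w _
    exact foldl_if_any _ _ _ _
  rw [hB, foldl_last_match, Option.or_none, build_eq_flat, get?_foldl_insert]
  simp only [PySem.Dict.get?_empty, Option.or_none]
  rw [reverse_flatMap, find?_flatMap]
  apply map_findSome?_of_ite
  intro w _
  rw [map_snd_find?_const _ w _ (by
    intro q hq
    rw [List.mem_reverse] at hq
    unfold pairsOf at hq
    rcases List.mem_map.mp hq with ⟨j, _, hj⟩
    rw [← hj])]
  rw [List.any_reverse]
  unfold pairsOf
  rw [List.any_map]
  rfl

-- ===== VERDICT (by name: the statement is the Claim_ definition above) =====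
theorem solution_louis_spec : Claim_equal_solution_louis := by
  intro pw ms _hdom
  unfold Spec_solution_louis
  simp only [solution_louis, solution_louis_alt]
  apply PySem.List.foldl_congr_mem'
  intro m _hmem res
  apply PySem.List.foldl_congr_mem'
  intro i _hi res'
  have hb := lookup_eq_scan pw m i
  unfold keyI at hb
  rw [hb]
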